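-- pv_equiv track=rewrite | github.com/welflau/ai-dev-system | backend/actions/chat/detect_project_type.py | _compute_warnings
-- ===== SOURCE A (Python) =====
-- from typing import Any, Dict, List, Optional
--
-- def _compute_warnings(candidates: List[Dict]) -> List[str]:
--     """探测结果的提示：缺 platform:* / category:* / 冲突等"""
--     traits = [c["trait"] for c in candidates]
--     warnings = []
--     if not any(t.startswith("platform:") for t in traits):
--         warnings.append("未探测到 platform:*，建议用户手选")
--     if not any(t.startswith("category:") for t in traits):
--         warnings.append("未探测到 category:*，建议用户手选（app / game / service）")
--     if "category:game" in traits and not any(t.startswith("engine:") for t in traits):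
--         warnings.append("看起来是游戏项目但未识别到引擎，建议手选 engine:*")
--     # 多引擎冲突
--     engines = [t for t in traits if t.startswith("engine:") and t != "engine:none"]
--     if len(engines) > 1:
--         warnings.append(f"识别到多个引擎 {engines}，可能是残留文件，请人工确认")
--     return warnings
-- ===== SOURCE B (Python) =====
-- def _compute_warnings(candidates):
--     """Single pass over candidates: collect flags and engine list, then emit the warnings in order."""
--     has_platform = has_category = has_game = has_engine = False
--     engines = []
--     for c in candidates:
--         t = c["trait"]
--         if t.startswith("platform:"):
--             has_platform = True
--         elif t.startswith("category:"):
--             has_category = True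
--             if t == "category:game":
--                 has_game = True
--         elif t.startswith("engine:"):
--             has_engine = True
--             if t != "engine:none":
--                 engines.append(t)
--     warnings = []
--     if not has_platform:
--         warnings.append("未探测到 platform:*，建议用户手选")
--     if not has_category:
--         warnings.append("未探测到 category:*，建议用户手选（app / game / service）")
--     if has_game and not has_engine:
--         warnings.append("看起来是游戏项目但未识别到引擎，建议手选 engine:*")
--     if len(engines) > 1:
--         warnings.append(f"识别到多个引擎 {engines}，可能是残留文件，请人工确认")
--     return warnings
-- ===== Notes on version B (the rewrite author's own statement) =====
-- stated objective: simpler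
-- what changed: Replaces the traits list plus four separate scans (two any-scans, a membership test, a filter) with one pass over candidates that accumulates has_platform/has_category/has_game/has_engine flags and the engines list, then emits the warnings.
import Mathlib
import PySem

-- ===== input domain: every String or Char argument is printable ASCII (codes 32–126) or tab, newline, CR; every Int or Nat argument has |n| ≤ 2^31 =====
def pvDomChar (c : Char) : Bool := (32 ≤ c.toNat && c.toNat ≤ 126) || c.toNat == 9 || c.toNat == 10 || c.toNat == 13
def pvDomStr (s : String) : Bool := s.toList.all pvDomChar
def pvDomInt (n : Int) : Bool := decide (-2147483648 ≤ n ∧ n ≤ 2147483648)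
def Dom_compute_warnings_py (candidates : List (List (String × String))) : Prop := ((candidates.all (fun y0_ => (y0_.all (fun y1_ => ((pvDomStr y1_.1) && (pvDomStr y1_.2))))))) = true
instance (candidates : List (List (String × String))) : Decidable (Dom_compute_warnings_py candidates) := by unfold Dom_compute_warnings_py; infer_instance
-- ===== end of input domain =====

-- B replaces A's traits list and its four separate scans by one accumulating pass over the candidates (simpler decomposition, same O(n) cost).

-- ===== PORT A =====
-- Shared by both ports: the f-string "{engines}" formats a Python list of strings via repr.
-- Hand-ported; exact for strings over the Dom alphabet (printable ASCII, tab, newline, CR).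
def pyEscChar (q : Char) (c : Char) : List Char :=
  if c = '\\' then ['\\', '\\']
  else if c = q then ['\\', q]
  else if c = Char.ofNat 9 then ['\\', 't']
  else if c = Char.ofNat 10 then ['\\', 'n']
  else if c = Char.ofNat 13 then ['\\', 'r']
  else [c]

def pyReprStr (s : String) : String :=
  let cs := s.toList
  let q : Char := if cs.contains '\'' && !(cs.contains '"') then '"' else '\''
  String.ofList (q :: (cs.flatMap (pyEscChar q) ++ [q]))

def pyReprStrList (xs : List String) : String :=
  "[" ++ String.intercalate ", " (xs.map pyReprStr) ++ "]"

-- c["trait"]: first matching key in the association list (none = KeyError)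
def pyDictGetStr? (c : List (String × String)) (k : String) : Option String :=
  (c.find? (fun p => p.1 == k)).map (·.2)

-- traits = [c["trait"] for c in candidates]; none as soon as a candidate lacks the key (KeyError)
def traitsA (candidates : List (List (String × String))) : Option (List String) :=
  candidates.mapM (fun c => pyDictGetStr? c "trait")

def warningsFromTraits (traits : List String) : List String :=
  let w1 := if !(traits.any (fun t => PySem.Str.startswith t "platform:")) then
      ["未探测到 platform:*，建议用户手选"] else []
  let w2 := if !(traits.any (fun t => PySem.Str.startswith t "category:")) then
      ["未探测到 category:*，建议用户手选（app / game / service）"] else []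
  let w3 := if traits.contains "category:game" && !(traits.any (fun t => PySem.Str.startswith t "engine:")) then
      ["看起来是游戏项目但未识别到引擎，建议手选 engine:*"] else []
  let engines := traits.filter (fun t => PySem.Str.startswith t "engine:" && t != "engine:none")
  let w4 := if engines.length > 1 then
      ["识别到多个引擎 " ++ pyReprStrList engines ++ "，可能是残留文件，请人工确认"] else []
  w1 ++ w2 ++ w3 ++ w4

def compute_warnings_py (candidates : List (List (String × String))) : List String :=
  match traitsA candidates with
  | none => []          -- KeyError in Python; excluded by Pre_
  | some traits => warningsFromTraits traits

-- ===== PORT B =====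
-- loop state: (has_platform, has_category, has_game, has_engine, engines)
def bStep (st : Bool × Bool × Bool × Bool × List String) (t : String) :
    Bool × Bool × Bool × Bool × List String :=
  let (hp, hc, hg, he, eng) := st
  if PySem.Str.startswith t "platform:" then (true, hc, hg, he, eng)
  else if PySem.Str.startswith t "category:" then
    (hp, true, (if t == "category:game" then true else hg), he, eng)
  else if PySem.Str.startswith t "engine:" then
    (hp, hc, hg, true, if t != "engine:none" then eng ++ [t] else eng)
  else (hp, hc, hg, he, eng)

def bLoop : List (List (String × String)) → (Bool × Bool × Bool × Bool × List String) →
    Option (Bool × Bool × Bool × Bool × List String)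
  | [], st => some st
  | c :: rest, st =>
    match pyDictGetStr? c "trait" with
    | none => none        -- KeyError, raised eagerly at this candidate
    | some t => bLoop rest (bStep st t)

def compute_warnings_py_alt (candidates : List (List (String × String))) : List String :=
  match bLoop candidates (false, false, false, false, []) with
  | none => []            -- KeyError in Python; excluded by Pre_
  | some (hp, hc, hg, he, eng) =>
    (if !hp then ["未探测到 platform:*，建议用户手选"] else []) ++
    (if !hc then ["未探测到 category:*，建议用户手选（app / game / service）"] else []) ++
    (if hg && !he then ["看起来是游戏项目但未识别到引擎，建议手选 engine:*"] else []) ++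
    (if eng.length > 1 then
      ["识别到多个引擎 " ++ pyReprStrList eng ++ "，可能是残留文件，请人工确认"] else [])

-- ===== PRECONDITION & SPEC =====
-- Pre_ excludes exactly the inputs where some candidate dict lacks the "trait" key: there Python A raises KeyError.
def Pre_compute_warnings_py (candidates : List (List (String × String))) : Prop :=
  ∀ c ∈ candidates, ∃ p ∈ c, p.1 = "trait"
instance (candidates : List (List (String × String))) : Decidable (Pre_compute_warnings_py candidates) := by
  unfold Pre_compute_warnings_py; infer_instance

def pvWitness_compute_warnings_py : (List (List (String × String))) :=
  [[("trait", "platform:ios")], [("trait", "category:game")]]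

def Spec_compute_warnings_py (candidates : List (List (String × String))) (out : List String) : Prop := out = compute_warnings_py_alt candidates
instance (candidates : List (List (String × String))) (out : List String) : Decidable (Spec_compute_warnings_py candidates out) := by unfold Spec_compute_warnings_py; infer_instance

-- ===== CLAIM (what is proved, stated in full; the proofs are below) =====
def Claim_equal_compute_warnings_py : Prop := ∀ (candidates : List (List (String × String))), Dom_compute_warnings_py candidates → Pre_compute_warnings_py candidates → Spec_compute_warnings_py candidates (compute_warnings_py candidates)

-- ===== LEMMAS AND PROOFS =====

-- prefixes with distinct first characters are mutually exclusive
lemma not_sw_of_sw {l : List Char} {a b : Char} {p q : List Char}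
    (hne : a ≠ b) (h : PySem.Chars.startswith l (a :: p) = true) :
    PySem.Chars.startswith l (b :: q) = false := by
  cases hq : PySem.Chars.startswith l (b :: q) with
  | false => rfl
  | true =>
    rw [PySem.Chars.startswith_iff] at h hq
    obtain ⟨u, hu⟩ := h
    obtain ⟨v, hv⟩ := hq
    rw [← hu] at hv
    simp only [List.cons_append, List.cons.injEq] at hv
    exact absurd hv.1.symm hne

lemma traits_bLoop (cs : List (List (String × String)))
    (st : Bool × Bool × Bool × Bool × List String) :
    bLoop cs st = (traitsA cs).map (fun ts => ts.foldl bStep st) := by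
  induction cs generalizing st with
  | nil => simp [bLoop, traitsA]
  | cons c rest ih =>
    cases h : pyDictGetStr? c "trait" with
    | none => simp [bLoop, traitsA, h, List.mapM_cons]
    | some t =>
      simp only [bLoop, h, ih, traitsA, List.mapM_cons]
      cases hr : rest.mapM (fun c => pyDictGetStr? c "trait") <;>
        simp [List.foldl_cons]

lemma foldl_bStep (ts : List String) (hp hc hg he : Bool) (eng : List String) :
    ts.foldl bStep (hp, hc, hg, he, eng) =
      (hp || ts.any (fun t => PySem.Str.startswith t "platform:"),
       hc || ts.any (fun t => PySem.Str.startswith t "category:"),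
       hg || ts.contains "category:game",
       he || ts.any (fun t => PySem.Str.startswith t "engine:"),
       eng ++ ts.filter (fun t => PySem.Str.startswith t "engine:" && t != "engine:none")) := by
  induction ts generalizing hp hc hg he eng with
  | nil => simp
  | cons t ts ih =>
    by_cases h1 : PySem.Chars.startswith t.toList ['p','l','a','t','f','o','r','m',':'] = true
    · have h2 : PySem.Chars.startswith t.toList ['c','a','t','e','g','o','r','y',':'] = false :=
        not_sw_of_sw (by decide) h1
      have h3 : PySem.Chars.startswith t.toList ['e','n','g','i','n','e',':'] = false :=
        not_sw_of_sw (by decide) h1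
      have hne : "category:game" ≠ t := by
        intro he'; rw [← he'] at h1; exact absurd h1 (by decide)
      simp [List.foldl_cons, bStep, h1, h2, h3, hne, ih]
    · rw [Bool.not_eq_true] at h1
      by_cases h2 : PySem.Chars.startswith t.toList ['c','a','t','e','g','o','r','y',':'] = true
      · have h3 : PySem.Chars.startswith t.toList ['e','n','g','i','n','e',':'] = false :=
          not_sw_of_sw (by decide) h2
        by_cases hcg : t = "category:game"
        · subst hcg
          simp [List.foldl_cons, bStep, ih,
            (by decide : PySem.Chars.startswith ['c','a','t','e','g','o','r','y',':','g','a','m','e'] ['p','l','a','t','f','o','r','m',':'] = false),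
            (by decide : PySem.Chars.startswith ['c','a','t','e','g','o','r','y',':','g','a','m','e'] ['c','a','t','e','g','o','r','y',':'] = true),
            (by decide : PySem.Chars.startswith ['c','a','t','e','g','o','r','y',':','g','a','m','e'] ['e','n','g','i','n','e',':'] = false)]
        · have hne : "category:game" ≠ t := fun he' => hcg he'.symm
          simp [List.foldl_cons, bStep, h1, h2, h3, hcg, hne, ih]
      · rw [Bool.not_eq_true] at h2
        have hne : "category:game" ≠ t := by
          intro he'; rw [← he'] at h2; exact absurd h2 (by decide)
        by_cases h3 : PySem.Chars.startswith t.toList ['e','n','g','i','n','e',':'] = true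
        · by_cases hn : t = "engine:none"
          · subst hn
            simp [List.foldl_cons, bStep, ih, hne,
              (by decide : PySem.Chars.startswith ['e','n','g','i','n','e',':','n','o','n','e'] ['p','l','a','t','f','o','r','m',':'] = false),
              (by decide : PySem.Chars.startswith ['e','n','g','i','n','e',':','n','o','n','e'] ['c','a','t','e','g','o','r','y',':'] = false),
              (by decide : PySem.Chars.startswith ['e','n','g','i','n','e',':','n','o','n','e'] ['e','n','g','i','n','e',':'] = true)]
          · simp [List.foldl_cons, bStep, h1, h2, h3, hn, hne, ih]
        · rw [Bool.not_eq_true] at h3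
          simp [List.foldl_cons, bStep, h1, h2, h3, hne, ih]

lemma pre_traits {candidates : List (List (String × String))}
    (h : Pre_compute_warnings_py candidates) : ∃ ts, traitsA candidates = some ts := by
  induction candidates with
  | nil => exact ⟨[], rfl⟩
  | cons c rest ih =>
    obtain ⟨ts, hts⟩ := ih (fun c hc => h c (List.mem_cons_of_mem _ hc))
    obtain ⟨p, hp, hk⟩ := h c (List.mem_cons_self ..)
    have : (c.find? (fun p => p.1 == "trait")).isSome := by
      rw [List.find?_isSome]
      exact ⟨p, hp, by simp [hk]⟩
    obtain ⟨q, hq⟩ := Option.isSome_iff_exists.mp this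
    refine ⟨q.2 :: ts, ?_⟩
    have hget : pyDictGetStr? c "trait" = some q.2 := by simp [pyDictGetStr?, hq]
    simp only [traitsA, List.mapM_cons] at hts ⊢
    rw [hget, hts]
    rfl

-- ===== VERDICT (by name: the statement is the Claim_ definition above) =====
theorem compute_warnings_py_spec : Claim_equal_compute_warnings_py := by
  intro candidates _dom hpre
  unfold Spec_compute_warnings_py
  obtain ⟨ts, hts⟩ := pre_traits hpre
  simp only [compute_warnings_py, compute_warnings_py_alt, hts,
    traits_bLoop, Option.map_some, foldl_bStep, warningsFromTraits,
    Bool.false_or, List.nil_append]
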